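-- pv_equiv track=rewrite | github.com/ford-at-home/prompt2production | core/services/music_generator.py | create_music_prompt
-- ===== SOURCE A (Python) =====
-- from typing import Dict
--
-- def create_music_prompt(topic: str, config: Dict) -> str:
--     """Create a music generation prompt based on the video topic.
--
--     Maps technical topics to appropriate musical styles.
--     """
--     # Extract key themes
--     topic_lower = topic.lower()
--
--     # Determine music style based on topic
--     if any(word in topic_lower for word in ['technology', 'tech', 'software', 'computer', 'digital', 'ai']):
--         base_style = "ambient electronic, tech house, futuristic"
--         mood = "innovative, forward-thinking"
--     elif any(word in topic_lower for word in ['science', 'biology', 'chemistry', 'physics', 'nature']):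
--         base_style = "atmospheric, orchestral, documentary"
--         mood = "wonder, discovery"
--     elif any(word in topic_lower for word in ['business', 'finance', 'corporate', 'management']):
--         base_style = "corporate, uplifting, professional"
--         mood = "confident, productive"
--     elif any(word in topic_lower for word in ['health', 'medical', 'medicine', 'wellness']):
--         base_style = "calming, healing, ambient"
--         mood = "peaceful, reassuring"
--     elif any(word in topic_lower for word in ['history', 'ancient', 'classical', 'traditional']):
--         base_style = "orchestral, period-appropriate, cinematic"
--         mood = "epic, timeless"
--     else:
--         base_style = "ambient, educational, modern"
--         mood = "engaging, clear"
--
--     # Get tone from config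
--     tone = config.get('tone', 'educational')
--
--     # Build the prompt
--     if tone == 'epic':
--         return f"{base_style}, epic cinematic, {mood}, dramatic builds"
--     elif tone == 'playful':
--         return f"{base_style}, upbeat, playful, {mood}, light and fun"
--     elif tone == 'professional':
--         return f"{base_style}, {mood}, sophisticated, subtle"
--     else:  # educational
--         return f"{base_style}, {mood}, clear, supportive, not distracting"
-- ===== SOURCE B (Python) =====
-- # Different algorithm: a flat keyword -> category-index map; the category is the
-- # MINIMUM index among all matching keywords (equivalent to A's first-match chain
-- # because the chain picks the lowest-indexed matching group), then a tone ->
-- # template dict whose templates are formatted with the chosen style/mood.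
--
-- _KEYWORD_CATEGORY = {
--     'technology': 0, 'tech': 0, 'software': 0, 'computer': 0, 'digital': 0, 'ai': 0,
--     'science': 1, 'biology': 1, 'chemistry': 1, 'physics': 1, 'nature': 1,
--     'business': 2, 'finance': 2, 'corporate': 2, 'management': 2,
--     'health': 3, 'medical': 3, 'medicine': 3, 'wellness': 3,
--     'history': 4, 'ancient': 4, 'classical': 4, 'traditional': 4,
-- }
--
-- _STYLES = [
--     ("ambient electronic, tech house, futuristic", "innovative, forward-thinking"),
--     ("atmospheric, orchestral, documentary", "wonder, discovery"),
--     ("corporate, uplifting, professional", "confident, productive"),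
--     ("calming, healing, ambient", "peaceful, reassuring"),
--     ("orchestral, period-appropriate, cinematic", "epic, timeless"),
--     ("ambient, educational, modern", "engaging, clear"),  # default, index 5
-- ]
--
-- _TEMPLATES = {
--     'epic': "{base_style}, epic cinematic, {mood}, dramatic builds",
--     'playful': "{base_style}, upbeat, playful, {mood}, light and fun",
--     'professional': "{base_style}, {mood}, sophisticated, subtle",
-- }
-- _EDUCATIONAL_TEMPLATE = "{base_style}, {mood}, clear, supportive, not distracting"
--
--
-- def create_music_prompt(topic: str, config) -> str:
--     topic_lower = topic.lower()
--     idx = min((cat for kw, cat in _KEYWORD_CATEGORY.items() if kw in topic_lower),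
--               default=len(_STYLES) - 1)
--     base_style, mood = _STYLES[idx]
--     template = _TEMPLATES.get(config.get('tone', 'educational'), _EDUCATIONAL_TEMPLATE)
--     return template.format(base_style=base_style, mood=mood)
-- ===== Notes on version B (the rewrite author's own statement) =====
-- stated objective: alternative
-- what changed: Replaced A's first-match if/elif keyword chains by a flat keyword->category-index map folded to the MINIMUM matching index (correct because A's chain picks the lowest-indexed matching group), an indexed style list, and tone templates with {base_style}/{mood} placeholders filled by format instead of per-tone f-string branches.
import Mathlib
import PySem

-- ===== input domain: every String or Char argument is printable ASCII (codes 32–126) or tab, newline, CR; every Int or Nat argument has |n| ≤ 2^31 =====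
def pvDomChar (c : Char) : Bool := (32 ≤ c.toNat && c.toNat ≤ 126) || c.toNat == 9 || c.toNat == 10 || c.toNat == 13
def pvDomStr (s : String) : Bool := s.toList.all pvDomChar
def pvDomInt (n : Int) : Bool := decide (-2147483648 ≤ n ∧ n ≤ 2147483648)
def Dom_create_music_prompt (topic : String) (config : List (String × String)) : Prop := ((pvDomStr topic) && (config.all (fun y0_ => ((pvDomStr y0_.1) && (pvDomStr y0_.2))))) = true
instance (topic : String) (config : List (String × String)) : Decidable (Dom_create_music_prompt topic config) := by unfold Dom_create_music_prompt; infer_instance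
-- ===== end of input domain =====

-- B replaces A's if/elif keyword chain by a flat keyword→category map whose minimum matching
-- index selects the style, and the tone chain by formatted templates (objective: alternative).

-- ===== PORT A =====
def create_music_prompt (topic : String) (config : List (String × String)) : String :=
  let topic_lower := PySem.Str.lower topic
  let sm : String × String :=
    if ["technology", "tech", "software", "computer", "digital", "ai"].any
        (fun w => PySem.Str.isIn w topic_lower) then
      ("ambient electronic, tech house, futuristic", "innovative, forward-thinking")
    else if ["science", "biology", "chemistry", "physics", "nature"].any
        (fun w => PySem.Str.isIn w topic_lower) then
      ("atmospheric, orchestral, documentary", "wonder, discovery")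
    else if ["business", "finance", "corporate", "management"].any
        (fun w => PySem.Str.isIn w topic_lower) then
      ("corporate, uplifting, professional", "confident, productive")
    else if ["health", "medical", "medicine", "wellness"].any
        (fun w => PySem.Str.isIn w topic_lower) then
      ("calming, healing, ambient", "peaceful, reassuring")
    else if ["history", "ancient", "classical", "traditional"].any
        (fun w => PySem.Str.isIn w topic_lower) then
      ("orchestral, period-appropriate, cinematic", "epic, timeless")
    else
      ("ambient, educational, modern", "engaging, clear")
  let base_style := sm.1
  let mood := sm.2
  let tone := PySem.Dict.getD (PySem.Dict.mk config) "tone" "educational"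
  if tone == "epic" then
    base_style ++ ", epic cinematic, " ++ mood ++ ", dramatic builds"
  else if tone == "playful" then
    base_style ++ ", upbeat, playful, " ++ mood ++ ", light and fun"
  else if tone == "professional" then
    base_style ++ ", " ++ mood ++ ", sophisticated, subtle"
  else
    base_style ++ ", " ++ mood ++ ", clear, supportive, not distracting"

-- ===== PORT B =====
def pvKeywordCategory : List (String × Nat) :=
  [("technology", 0), ("tech", 0), ("software", 0), ("computer", 0), ("digital", 0), ("ai", 0),
   ("science", 1), ("biology", 1), ("chemistry", 1), ("physics", 1), ("nature", 1),
   ("business", 2), ("finance", 2), ("corporate", 2), ("management", 2),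
   ("health", 3), ("medical", 3), ("medicine", 3), ("wellness", 3),
   ("history", 4), ("ancient", 4), ("classical", 4), ("traditional", 4)]

def pvStyles : List (String × String) :=
  [("ambient electronic, tech house, futuristic", "innovative, forward-thinking"),
   ("atmospheric, orchestral, documentary", "wonder, discovery"),
   ("corporate, uplifting, professional", "confident, productive"),
   ("calming, healing, ambient", "peaceful, reassuring"),
   ("orchestral, period-appropriate, cinematic", "epic, timeless"),
   ("ambient, educational, modern", "engaging, clear")]

def pvTemplates : PySem.Dict String String :=
  PySem.Dict.mk
    [("epic", "{base_style}, epic cinematic, {mood}, dramatic builds"),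
     ("playful", "{base_style}, upbeat, playful, {mood}, light and fun"),
     ("professional", "{base_style}, {mood}, sophisticated, subtle")]

def pvEducationalTemplate : String := "{base_style}, {mood}, clear, supportive, not distracting"

def create_music_prompt_alt (topic : String) (config : List (String × String)) : String :=
  let topic_lower := PySem.Str.lower topic
  -- Python's min(generator, default=len(_STYLES)-1): fold computing the minimum matching index
  let idx := pvKeywordCategory.foldl
    (fun acc kc => if PySem.Str.isIn kc.1 topic_lower then min acc kc.2 else acc)
    (pvStyles.length - 1)
  let sm := pvStyles.getD idx ("", "")   -- _STYLES[idx]; idx is always in range (≤ 5)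
  let template := pvTemplates.getD (PySem.Dict.getD (PySem.Dict.mk config) "tone" "educational")
    pvEducationalTemplate
  -- .format with each placeholder occurring once and placeholder-free values: exact as two replaces
  PySem.Str.replace (PySem.Str.replace template "{base_style}" sm.1) "{mood}" sm.2

-- ===== PRECONDITION & SPEC =====
def Spec_create_music_prompt (topic : String) (config : List (String × String)) (out : String) : Prop := out = create_music_prompt_alt topic config
instance (topic : String) (config : List (String × String)) (out : String) : Decidable (Spec_create_music_prompt topic config out) := by unfold Spec_create_music_prompt; infer_instance

-- ===== CLAIM =====
def Claim_equal_create_music_prompt : Prop := ∀ (topic : String) (config : List (String × String)), Dom_create_music_prompt topic config → Spec_create_music_prompt topic config (create_music_prompt topic config)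

-- ===== LEMMAS AND PROOFS =====

def pvStep (tl : String) (acc : Nat) (kc : String × Nat) : Nat :=
  if PySem.Str.isIn kc.1 tl then min acc kc.2 else acc

-- folding one keyword group (all mapped to category c) computes min acc c iff some keyword matches
theorem pv_fold_group (tl : String) (kws : List String) (c : Nat) (acc : Nat) :
    (kws.map (fun k => (k, c))).foldl (pvStep tl) acc =
      if kws.any (fun w => PySem.Str.isIn w tl) then min acc c else acc := by
  induction kws generalizing acc with
  | nil => simp
  | cons k ks ih =>
    simp only [List.map, List.foldl, List.any, pvStep]
    by_cases h : PySem.Str.isIn k tl = true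
    · simp only [h, ih, Bool.true_or, if_true]
      split_ifs <;> simp
    · simp only [h]
      simp only [Bool.not_eq_true] at h
      simp [ih]

theorem pv_table_eq :
    pvKeywordCategory =
      (["technology", "tech", "software", "computer", "digital", "ai"].map (fun k => (k, 0)))
      ++ (["science", "biology", "chemistry", "physics", "nature"].map (fun k => (k, 1)))
      ++ (["business", "finance", "corporate", "management"].map (fun k => (k, 2)))
      ++ (["health", "medical", "medicine", "wellness"].map (fun k => (k, 3)))
      ++ (["history", "ancient", "classical", "traditional"].map (fun k => (k, 4))) := rfl

-- the fold over the flat keyword table unfolds to the chain of group tests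
theorem pv_idx_eq (tl : String) :
    pvKeywordCategory.foldl
      (fun acc kc => if PySem.Str.isIn kc.1 tl then min acc kc.2 else acc)
      (pvStyles.length - 1) =
    (if ["technology", "tech", "software", "computer", "digital", "ai"].any
        (fun w => PySem.Str.isIn w tl) then 0
    else if ["science", "biology", "chemistry", "physics", "nature"].any
        (fun w => PySem.Str.isIn w tl) then 1
    else if ["business", "finance", "corporate", "management"].any
        (fun w => PySem.Str.isIn w tl) then 2
    else if ["health", "medical", "medicine", "wellness"].any
        (fun w => PySem.Str.isIn w tl) then 3
    else if ["history", "ancient", "classical", "traditional"].any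
        (fun w => PySem.Str.isIn w tl) then 4
    else 5) := by
  have hs : pvStyles.length - 1 = 5 := rfl
  rw [pv_table_eq, hs]
  show _root_.List.foldl (pvStep tl) 5 _ = _
  rw [List.foldl_append, List.foldl_append, List.foldl_append, List.foldl_append]
  rw [pv_fold_group, pv_fold_group, pv_fold_group, pv_fold_group, pv_fold_group]
  split_ifs <;> rfl

theorem pv_tone_eq (t : String) :
    pvTemplates.getD t pvEducationalTemplate =
      (if t == "epic" then "{base_style}, epic cinematic, {mood}, dramatic builds"
      else if t == "playful" then "{base_style}, upbeat, playful, {mood}, light and fun"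
      else if t == "professional" then "{base_style}, {mood}, sophisticated, subtle"
      else pvEducationalTemplate) := by
  by_cases h1 : t = "epic"
  · subst h1; rfl
  by_cases h2 : t = "playful"
  · subst h2; rfl
  by_cases h3 : t = "professional"
  · subst h3; rfl
  have e1 : (("epic" : String) == t) = false := by simp; exact fun h => h1 h.symm
  have e2 : (("playful" : String) == t) = false := by simp; exact fun h => h2 h.symm
  have e3 : (("professional" : String) == t) = false := by simp; exact fun h => h3 h.symm
  simp [pvTemplates, PySem.Dict.getD, PySem.Dict.get?, List.find?, e1, e2, e3, h1, h2, h3]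

-- ===== VERDICT =====
set_option maxHeartbeats 2000000 in
theorem create_music_prompt_spec : Claim_equal_create_music_prompt := by
  intro topic config _
  unfold Spec_create_music_prompt create_music_prompt create_music_prompt_alt
  simp only [pv_idx_eq, pv_tone_eq]
  split_ifs <;> rfl
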